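-- pv_equiv track=rewrite | github.com/Engineerbabu777/epassport-reader-via--nfc | backend/app.py | conservative_replace_k_runs
-- ===== SOURCE A (Python) =====
-- def conservative_replace_k_runs(s):
--     out = []
--     i = 0
--     n = len(s)
--     while i < n:
--         if s[i] in ("K", "k"):
--             j = i
--             while j < n and s[j] in ("K", "k"):
--                 j += 1
--             run = j - i
--             out.append("<" * run if run >= 2 else "K")
--             i = j
--         else:
--             out.append(s[i])
--             i += 1
--     return "".join(out)
-- ===== SOURCE B (Python) =====
-- def conservative_replace_k_runs(s):
--     # Stage 1: partition s into maximal runs of characters with equal "K-ness"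
--     # (a hand-rolled groupby); Stage 2: render each run.
--     groups = []
--     for c in s:
--         k = c in ("K", "k")
--         if groups and groups[-1][0] == k:
--             groups[-1][1].append(c)
--         else:
--             groups.append((k, [c]))
--     return "".join(
--         ("<" * len(cs) if len(cs) >= 2 else "K") if k else "".join(cs)
--         for k, cs in groups
--     )
-- ===== Notes on version B (the rewrite author's own statement) =====
-- stated objective: alternative
-- what changed: Replaces A's index-driven scan with an inner K-run-walking while loop by a two-stage groupby: first partition the whole string into maximal runs of equal K-ness into an intermediate groups list, then render each group in a second pass.
import Mathlib
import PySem

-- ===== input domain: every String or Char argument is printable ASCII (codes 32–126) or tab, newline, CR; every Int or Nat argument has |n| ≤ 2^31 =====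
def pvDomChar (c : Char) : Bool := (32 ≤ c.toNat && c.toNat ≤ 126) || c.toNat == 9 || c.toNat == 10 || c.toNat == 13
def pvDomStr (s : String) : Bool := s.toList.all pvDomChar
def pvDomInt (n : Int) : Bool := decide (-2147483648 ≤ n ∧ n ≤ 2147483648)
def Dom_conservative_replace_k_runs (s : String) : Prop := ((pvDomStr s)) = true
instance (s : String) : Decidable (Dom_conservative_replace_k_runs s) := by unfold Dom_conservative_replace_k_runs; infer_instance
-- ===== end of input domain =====

-- B replaces A's index-driven scan (inner while only over K-runs) by a two-stage groupby: partition the string into maximal runs of equal K-ness, then render each group (objective: alternative).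


-- ===== PORT A =====
-- `s[i] in ("K","k")`
def pvIsK (c : Char) : Bool := c == 'K' || c == 'k'

-- A's inner `while j < n and s[j] in ("K","k")`: number of leading K/k characters
def pvCountK : List Char → Nat
  | [] => 0
  | c :: rest => if pvIsK c then pvCountK rest + 1 else 0

-- A's outer while loop; each element of the result is one string appended to `out`
def pvALoop : List Char → List (List Char)
  | [] => []
  | c :: rest =>
    if pvIsK c then
      let k := pvCountK rest            -- run = k + 1
      (if k + 1 ≥ 2 then List.replicate (k + 1) '<' else ['K']) :: pvALoop (rest.drop k)
    else
      [c] :: pvALoop rest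
termination_by l => l.length
decreasing_by
  all_goals simp [List.length_drop]

def conservative_replace_k_runs (s : String) : String :=
  String.ofList (pvALoop s.toList).flatten

-- ===== PORT B =====
-- B stage 1's loop body: `if groups and groups[-1][0] == k: groups[-1][1].append(c) else: groups.append((k,[c]))`
def pvPush (groups : List (Bool × List Char)) (c : Char) : List (Bool × List Char) :=
  let k := pvIsK c
  match groups.getLast? with
  | some (k', cs) => if k' == k then groups.dropLast ++ [(k', cs ++ [c])] else groups ++ [(k, [c])]
  | none => [(k, [c])]

-- B stage 2: render one group
def pvRender (g : Bool × List Char) : List Char :=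
  if g.1 then (if g.2.length ≥ 2 then List.replicate g.2.length '<' else ['K']) else g.2

def conservative_replace_k_runs_alt (s : String) : String :=
  String.ofList (((s.toList.foldl pvPush []).map pvRender).flatten)

-- ===== PRECONDITION & SPEC =====
def Spec_conservative_replace_k_runs (s : String) (out : String) : Prop := out = conservative_replace_k_runs_alt s
instance (s : String) (out : String) : Decidable (Spec_conservative_replace_k_runs s out) := by unfold Spec_conservative_replace_k_runs; infer_instance

-- ===== CLAIM (what is proved, stated in full; the proofs are below) =====
def Claim_equal_conservative_replace_k_runs : Prop := ∀ (s : String), Dom_conservative_replace_k_runs s → Spec_conservative_replace_k_runs s (conservative_replace_k_runs s)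

-- ===== LEMMAS AND PROOFS =====
-- canonical grouping of a list into maximal runs of equal K-ness (proof-side specification)
def pvGroups : List Char → List (Bool × List Char)
  | [] => []
  | c :: rest =>
    (pvIsK c, c :: rest.takeWhile (fun d => pvIsK d == pvIsK c))
      :: pvGroups (rest.dropWhile (fun d => pvIsK d == pvIsK c))
termination_by l => l.length
decreasing_by
  simp only [List.length_cons]
  exact Nat.lt_succ_of_le (List.length_dropWhile_le _ _)

theorem pvGroups_ne {l : List Char} (h : l ≠ []) : pvGroups l ≠ [] := by
  cases l with
  | nil => exact absurd rfl h
  | cons c rest => rw [pvGroups]; exact List.cons_ne_nil _ _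

-- pvPush only inspects/updates the last group
theorem pvPush_cons (g : Bool × List Char) (gs : List (Bool × List Char)) (c : Char)
    (h : gs ≠ []) : pvPush (g :: gs) c = g :: pvPush gs c := by
  cases gs with
  | nil => exact absurd rfl h
  | cons b m =>
    unfold pvPush
    rw [List.getLast?_cons_cons, List.dropLast_cons_of_ne_nil h]
    cases hg : (b :: m).getLast? with
    | none => exact absurd (List.getLast?_eq_none_iff.mp hg) (List.cons_ne_nil _ _)
    | some p =>
      obtain ⟨k', cs⟩ := p
      by_cases hk : k' == pvIsK c <;> simp [hk]

-- appending one character to the string appends it to the grouping via pvPush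
theorem pvGroups_snoc : ∀ (p : List Char) (c : Char),
    pvGroups (p ++ [c]) = pvPush (pvGroups p) c := by
  intro p
  induction hn : p.length using Nat.strong_induction_on generalizing p with
  | _ n ih =>
  intro c
  cases p with
  | nil => simp [pvGroups, pvPush]
  | cons d rest =>
    subst hn
    rw [pvGroups]
    rw [show (d :: rest) ++ [c] = d :: (rest ++ [c]) from rfl, pvGroups]
    rw [List.takeWhile_append, List.dropWhile_append]
    by_cases hall : (rest.takeWhile (fun x => pvIsK x == pvIsK d)).length = rest.length
    · have htw : rest.takeWhile (fun x => pvIsK x == pvIsK d) = rest :=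
        (List.takeWhile_prefix _).eq_of_length hall
      have hdw : rest.dropWhile (fun x => pvIsK x == pvIsK d) = [] := by
        have := List.takeWhile_append_dropWhile (p := fun x => pvIsK x == pvIsK d) (l := rest)
        rw [htw] at this
        simpa using this
      rw [if_pos hall, hdw]
      simp only [List.isEmpty_nil, htw]
      by_cases hc : pvIsK c = pvIsK d
      · have ht : [c].takeWhile (fun x => pvIsK x == pvIsK d) = [c] := by
          simp [List.takeWhile, hc]
        have hd : [c].dropWhile (fun x => pvIsK x == pvIsK d) = [] := by
          simp [List.dropWhile, hc]
        rw [ht, hd]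
        simp [pvGroups, pvPush, hc]
      · have hcb : (pvIsK c == pvIsK d) = false := by simp [hc]
        have ht : [c].takeWhile (fun x => pvIsK x == pvIsK d) = [] := by
          simp [List.takeWhile, hcb]
        have hd : [c].dropWhile (fun x => pvIsK x == pvIsK d) = [c] := by
          simp [List.dropWhile, hcb]
        rw [ht, hd]
        have : (pvIsK d == pvIsK c) = false := by
          simp only [beq_eq_false_iff_ne, ne_eq]
          exact fun hh => hc hh.symm
        simp [pvGroups, pvPush, this]
    · have hdw : rest.dropWhile (fun x => pvIsK x == pvIsK d) ≠ [] := by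
        intro hnil
        apply hall
        have := List.takeWhile_append_dropWhile (p := fun x => pvIsK x == pvIsK d) (l := rest)
        rw [hnil, List.append_nil] at this
        rw [this]
      rw [if_neg hall, if_neg (by simpa [List.isEmpty_iff] using hdw)]
      have hlen : (rest.dropWhile (fun x => pvIsK x == pvIsK d)).length < (d :: rest).length :=
        Nat.lt_succ_of_le (List.length_dropWhile_le _ _)
      rw [ih _ hlen _ rfl c]
      exact (pvPush_cons _ _ _ (pvGroups_ne hdw)).symm

-- B's stage-1 fold computes the canonical grouping
theorem pvFold_eq_groups (p : List Char) : p.foldl pvPush [] = pvGroups p := by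
  induction p using List.reverseRecOn with
  | nil => simp [pvGroups]
  | append_singleton q c ih =>
    rw [List.foldl_append, List.foldl_cons, List.foldl_nil, ih, pvGroups_snoc]

-- A's run counter is the length of the leading K-run
theorem pvCountK_eq (l : List Char) :
    pvCountK l = (l.takeWhile (fun d => pvIsK d)).length := by
  induction l with
  | nil => rfl
  | cons c rest ih =>
    by_cases h : pvIsK c = true
    · rw [pvCountK, if_pos h, List.takeWhile_cons, if_pos h, List.length_cons, ih]
    · rw [pvCountK, if_neg h, List.takeWhile_cons,
        if_neg h, List.length_nil]

-- drop (length of takeWhile) = dropWhile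
theorem pv_drop_takeWhile {α : Type} (P : α → Bool) (l : List α) :
    l.drop (l.takeWhile P).length = l.dropWhile P := by
  induction l with
  | nil => rfl
  | cons a l ih =>
    by_cases h : P a
    · rw [List.takeWhile_cons, if_pos h, List.length_cons, List.drop_succ_cons,
        List.dropWhile_cons, if_pos h, ih]
    · rw [List.takeWhile_cons, if_neg h, List.length_nil, List.drop_zero,
        List.dropWhile_cons, if_neg h]

-- rendering the grouping of a list with a non-K head peels off that one character
theorem pvGroups_head_nonK (c : Char) (rest : List Char) (h : pvIsK c = false) :
    ((pvGroups (c :: rest)).map pvRender).flatten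
      = c :: ((pvGroups rest).map pvRender).flatten := by
  rw [pvGroups]
  cases rest with
  | nil => simp [pvGroups, pvRender, h]
  | cons d r =>
    by_cases hd : pvIsK d = true
    · have : (pvIsK d == pvIsK c) = false := by simp [hd, h]
      simp only [List.takeWhile_cons, this, List.dropWhile_cons]
      simp [pvRender, h]
    · have hdf : pvIsK d = false := by simpa using hd
      have heq : pvIsK d = pvIsK c := by rw [hdf, h]
      have hpred : (fun x => pvIsK x == pvIsK d) = (fun x => pvIsK x == pvIsK c) := by
        funext x; rw [heq]
      rw [pvGroups, hpred]
      simp only [List.takeWhile_cons, List.dropWhile_cons, heq, beq_self_eq_true]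
      simp [pvRender, h]

-- main: A's pieces and B's rendered groups flatten to the same characters
theorem pv_main : ∀ l : List Char, (pvALoop l).flatten = ((pvGroups l).map pvRender).flatten := by
  intro l
  induction hn : l.length using Nat.strong_induction_on generalizing l with
  | _ n ih =>
  cases l with
  | nil => simp [pvALoop, pvGroups]
  | cons c rest =>
    subst hn
    by_cases h : pvIsK c = true
    · rw [pvALoop]
      rw [if_pos h, pvGroups]
      have hpred : (fun x => pvIsK x == pvIsK c) = (fun d => pvIsK d) := by
        funext x; rw [h]; simp
      rw [hpred]
      have hct : pvCountK rest = (rest.takeWhile (fun d => pvIsK d)).length := pvCountK_eq rest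
      have hdrop : rest.drop (pvCountK rest) = rest.dropWhile (fun d => pvIsK d) := by
        rw [hct, pv_drop_takeWhile]
      rw [List.map_cons, List.flatten_cons, List.flatten_cons, hdrop]
      have hlen : (rest.dropWhile (fun d => pvIsK d)).length < (c :: rest).length :=
        Nat.lt_succ_of_le (List.length_dropWhile_le _ _)
      rw [ih _ hlen _ rfl]
      congr 1
      simp [pvRender, h, hct]
    · have hf : pvIsK c = false := by simpa using h
      rw [pvALoop]
      rw [if_neg h, pvGroups_head_nonK c rest hf, List.flatten_cons]
      have hlen : rest.length < (c :: rest).length := Nat.lt_succ_self _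
      rw [ih _ hlen _ rfl]
      rfl

-- ===== VERDICT (by name: the statement is the Claim_ definition above) =====
theorem conservative_replace_k_runs_spec : Claim_equal_conservative_replace_k_runs := by
  intro s _
  unfold Spec_conservative_replace_k_runs conservative_replace_k_runs conservative_replace_k_runs_alt
  rw [pvFold_eq_groups, pv_main]
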